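-- pv_equiv track=rewrite | github.com/radu/advent | 13.py | pos_valid
-- ===== SOURCE A (Python) =====
-- gen = 1352
--
-- def pos_valid(pos):
--     (x,y) = (pos[0], pos[1])
--
--     if x==-1 or y==-1:
--         return False
--
--     v = (3+x+2*y) * x + (y+1) * y
--     v += gen
--
--     cnt = 0
--
--     for i in range(v.bit_length()-1, -1, -1):
--         cnt += (v >> i & 1)
--
--     if cnt % 2:
--         return False
--     else:
--         return True
-- ===== SOURCE B (Python) =====
-- gen = 1352
--
-- def pos_valid(pos):
--     x, y = pos[0], pos[1]
--
--     if x == -1 or y == -1: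
--         return False
--
--     v = (3 + x + 2 * y) * x + (y + 1) * y + gen
--
--     bl = v.bit_length()
--     shift = 1
--     while shift <= bl:
--         v ^= v >> shift
--         shift *= 2
--
--     return v & 1 == 0
-- ===== Notes on version B (the rewrite author's own statement) =====
-- stated objective: alternative
-- what changed: A counts set bits one at a time with a loop over every bit position of v; B folds v onto itself with doubling XOR shifts (v ^= v >> shift; shift *= 2) so bit 0 accumulates the popcount parity in O(log bits) word operations. Pre_ excludes the thin band of positions whose cell value v is negative (and not caught by the -1 guard): the bit parity of a negative integer is unspecified, and A's sum of arithmetic-shift bits over the low bit_length bits there is an artefact of Python's two's-complement shifts that no caller would specify.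
-- outside the precondition, e.g. on pos_valid((-2000, 1960)): A returns True, B returns False; on pos_valid((-1000, 1000)): A returns False, B returns False
import Mathlib
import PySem

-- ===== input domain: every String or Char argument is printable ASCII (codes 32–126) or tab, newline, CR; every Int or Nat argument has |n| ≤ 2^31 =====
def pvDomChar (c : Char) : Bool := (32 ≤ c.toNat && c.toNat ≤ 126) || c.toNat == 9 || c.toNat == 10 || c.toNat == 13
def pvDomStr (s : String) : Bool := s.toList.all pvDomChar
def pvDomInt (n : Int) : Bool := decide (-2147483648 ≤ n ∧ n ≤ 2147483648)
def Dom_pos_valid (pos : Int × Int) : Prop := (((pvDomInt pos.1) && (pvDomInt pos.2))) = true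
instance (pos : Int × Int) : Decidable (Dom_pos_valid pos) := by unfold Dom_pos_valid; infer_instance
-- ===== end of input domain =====

-- B replaces A's per-bit counting loop (one iteration per bit of v) by an XOR parity fold with
-- doubling shifts (one iteration per log of the bit width); same guard, same v, same result.

-- gen = 1352
def pyGen : Int := 1352

-- Python's 'a >> k' for a nonnegative shift amount (Lean's Int >>> Nat, pinned to the Nat instance)
def pyShr (a : Int) (k : Nat) : Int := a >>> k

-- ===== PORT A =====
-- Port of A: per-bit count over range(v.bit_length()-1, -1, -1).
-- 'v >> i & 1' = PySem.Int.band (v >>> i.toNat) 1; every i produced by the range is ≥ 0, so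
-- i.toNat is exact there.
def pos_valid (pos : Int × Int) : Bool :=
  let x := pos.1
  let y := pos.2
  if x = -1 ∨ y = -1 then
    false
  else
    let v0 := (3 + x + 2 * y) * x + (y + 1) * y
    let v := v0 + pyGen
    let cnt :=
      (PySem.List.pyRange ((PySem.Int.bitLength v : Int) - 1) (-1) (-1)).foldl
        (fun c i => c + PySem.Int.band (pyShr v i.toNat) 1) (0 : Int)
    if PySem.Int.mod cnt 2 ≠ 0 then false else true

-- ===== PORT B =====
-- Source B's while loop: 'while shift <= bl: v ^= v >> shift; shift *= 2'.
-- The extra '1 ≤ shift' conjunct is a pure totality guard (shift starts at 1 and only doubles,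
-- so it always holds at every call); it lets Lean see bl + 1 - shift decrease.
def altFold (v : Int) (shift bl : Nat) : Int :=
  if shift ≤ bl ∧ 1 ≤ shift then
    altFold (PySem.Int.bxor v (v >>> shift)) (2 * shift) bl
  else v
termination_by bl + 1 - shift
decreasing_by omega

def pos_valid_alt (pos : Int × Int) : Bool :=
  let x := pos.1
  let y := pos.2
  if x = -1 ∨ y = -1 then
    false
  else
    let v := (3 + x + 2 * y) * x + (y + 1) * y + pyGen
    let bl := PySem.Int.bitLength v
    PySem.Int.band (altFold v 1 bl) 1 == 0

-- ===== PRECONDITION & SPEC =====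
-- Pre_ excludes the thin band of positions whose cell value v is negative (and not already
-- caught by the -1 guard): the bit parity of a negative integer is unspecified, and A's sum of
-- arithmetic-shift bits over the low bit_length bits there is an artefact of Python's
-- two's-complement shifts that no caller would specify.
def Pre_pos_valid (pos : Int × Int) : Prop :=
  pos.1 = -1 ∨ pos.2 = -1 ∨
    0 ≤ (3 + pos.1 + 2 * pos.2) * pos.1 + (pos.2 + 1) * pos.2 + 1352
instance (pos : Int × Int) : Decidable (Pre_pos_valid pos) := by unfold Pre_pos_valid; infer_instance

def pvWitness_pos_valid : (Int × Int) := (0, 0)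

def Spec_pos_valid (pos : Int × Int) (out : Bool) : Prop := out = pos_valid_alt pos
instance (pos : Int × Int) (out : Bool) : Decidable (Spec_pos_valid pos out) := by unfold Spec_pos_valid; infer_instance

-- ===== CLAIM (what is proved, stated in full; the proofs are below) =====
def Claim_equal_pos_valid : Prop := ∀ (pos : Int × Int), Dom_pos_valid pos → Pre_pos_valid pos → Spec_pos_valid pos (pos_valid pos)

-- ===== LEMMAS AND PROOFS =====

-- xor of the s bits of n starting at position j
def wxor (n : Nat) : Nat → Nat → Bool
  | 0, _ => false
  | s + 1, j => wxor n s j ^^ n.testBit (j + s)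

theorem wxor_add (n : Nat) (t s j : Nat) :
    wxor n (s + t) j = (wxor n s j ^^ wxor n t (j + s)) := by
  induction t with
  | zero => simp [wxor]
  | succ t ih =>
      show wxor n ((s + t) + 1) j = ((wxor n s j) ^^ (wxor n (t + 1) (j + s)))
      simp only [wxor, ih, Bool.xor_assoc]
      rw [show j + (s + t) = j + s + t by omega]

theorem wxor_high (n bl : Nat) (hn : n < 2 ^ bl) (s j : Nat) (hj : bl ≤ j) :
    wxor n s j = false := by
  induction s with
  | zero => rfl
  | succ s ih =>
      simp only [wxor, ih]
      rw [Nat.testBit_eq_false_of_lt]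
      · rfl
      · exact lt_of_lt_of_le hn (Nat.pow_le_pow_right (by omega) (by omega))

-- the Nat shadow of altFold (on a nonnegative start altFold stays nonnegative)
def nfold (v shift bl : Nat) : Nat :=
  if shift ≤ bl ∧ 1 ≤ shift then
    nfold (v ^^^ (v >>> shift)) (2 * shift) bl
  else v
termination_by bl + 1 - shift
decreasing_by omega

theorem altFold_natCast (a s bl : Nat) : altFold (a : Int) s bl = ((nfold a s bl : Nat) : Int) := by
  unfold altFold nfold
  by_cases h : s ≤ bl ∧ 1 ≤ s
  · simp only [h]
    have h1 : ((a : Int)) >>> s = ((a >>> s : Nat) : Int) := rfl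
    rw [h1, PySem.Int.bxor_of_nonneg (by positivity) (by positivity)]
    simp only [Int.toNat_natCast]
    exact altFold_natCast (a ^^^ (a >>> s)) (2 * s) bl
  · simp [h]
termination_by bl + 1 - s
decreasing_by omega

theorem nfold_bit (n bl : Nat) (hn : n < 2 ^ bl) (s v : Nat) (hs : 1 ≤ s)
    (hv : ∀ j, v.testBit j = wxor n s j) :
    (nfold v s bl).testBit 0 = wxor n bl 0 := by
  unfold nfold
  by_cases h : s ≤ bl ∧ 1 ≤ s
  · simp only [h]
    refine nfold_bit n bl hn (2 * s) _ (by omega) ?_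
    intro j
    rw [Nat.testBit_xor, Nat.testBit_shiftRight, hv, hv,
      show s + j = j + s by omega, show 2 * s = s + s by omega, wxor_add]
  · simp only [h, if_false]
    obtain ⟨d, rfl⟩ : ∃ d, s = bl + d := ⟨s - bl, by omega⟩
    rw [hv 0, wxor_add, wxor_high n bl hn d (0 + bl) (by omega)]
    simp
termination_by bl + 1 - s
decreasing_by omega

theorem testBit_div_mod (i n : Nat) : n.testBit i = decide (n / 2 ^ i % 2 = 1) := by
  induction i generalizing n with
  | zero => simpa using Nat.testBit_zero n
  | succ i ih =>
      rw [Nat.testBit_succ, ih]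
      congr 2
      rw [Nat.div_div_eq_div_mul, pow_succ, mul_comm 2 (2 ^ i)]

-- A's '(v >> i) & 1' for nonnegative v is bit i of v.toNat
theorem band_shift_bit (n i : Nat) :
    PySem.Int.band (pyShr (n : Int) i) 1 = if n.testBit i then (1 : Int) else 0 := by
  have h1 : pyShr ((n : Nat) : Int) i = ((n >>> i : Nat) : Int) := rfl
  rw [h1, PySem.Int.band_of_nonneg (by positivity) (by norm_num)]
  simp only [Int.toNat_natCast, Int.toNat_one, Nat.and_one_is_mod]
  rw [testBit_div_mod, ← Nat.shiftRight_eq_div_pow]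
  by_cases hb : n >>> i % 2 = 1
  · simp [hb]
  · have : n >>> i % 2 = 0 := by omega
    simp [this]

-- fold-as-sum
theorem foldl_add_map (f : Int → Int) (l : List Int) (c : Int) :
    l.foldl (fun c i => c + f i) c = c + (l.map f).sum := by
  induction l generalizing c with
  | nil => simp
  | cons a l ih => simp [ih, add_assoc]

-- parity of the 0/1 bit sum is the xor of the bits
theorem sum_bits_mod (m : Nat) (bl : Nat) :
    PySem.Int.mod (((List.range bl).map (fun k => if m.testBit k then (1 : Int) else 0)).sum) 2
      = if wxor m bl 0 then 1 else 0 := by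
  rw [PySem.Int.mod_eq_emod_of_pos (by norm_num)]
  induction bl with
  | zero => simp [wxor]
  | succ bl ih =>
      rw [List.range_succ, List.map_append, List.sum_append]
      have hw : wxor m (bl + 1) 0 = (wxor m bl 0 ^^ m.testBit bl) := by
        simp [wxor]
      rw [hw]
      cases hW : wxor m bl 0 <;> cases hB : m.testBit bl <;>
        simp [hW, hB] at ih ⊢ <;> omega

-- the heart: for nonnegative v, A's per-bit-count answer equals B's xor-fold answer
theorem main_eq (v : Int) (hv0 : 0 ≤ v) :
    (if PySem.Int.mod
        ((PySem.List.pyRange ((PySem.Int.bitLength v : Int) - 1) (-1) (-1)).foldl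
          (fun c i => c + PySem.Int.band (pyShr v i.toNat) 1) (0 : Int)) 2 ≠ 0
      then false else true)
    = (PySem.Int.band (altFold v 1 (PySem.Int.bitLength v)) 1 == 0) := by
  obtain ⟨m, rfl⟩ : ∃ m : Nat, v = (m : Int) := ⟨v.toNat, (Int.toNat_of_nonneg hv0).symm⟩
  set bl := PySem.Int.bitLength (m : Int) with hbl
  have hm2 : m < 2 ^ bl := by
    have := PySem.Int.lt_two_pow_bitLength (m : Int)
    simpa using this
  -- LHS: rewrite the countdown range and the fold into a bit sum of m
  rw [PySem.List.pyRange_neg_one_eq_reverse, show (-1 : Int) + 1 = 0 by norm_num,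
    show ((bl : Int) - 1) + 1 = (bl : Int) by ring, PySem.List.pyRange_zero_nat,
    foldl_add_map (fun i => PySem.Int.band (pyShr (m : Int) i.toNat) 1), zero_add,
    List.map_reverse, List.sum_reverse]
  have hmap : List.map (fun i => PySem.Int.band (pyShr (m : Int) i.toNat) 1)
        (List.map (fun (k : Nat) => (↑k : Int)) (List.range bl))
      = List.map (fun k => if m.testBit k then (1 : Int) else 0) (List.range bl) := by
    rw [List.map_map]
    refine List.map_congr_left ?_
    intro k _
    simp only [Function.comp_apply, Int.toNat_natCast]
    exact band_shift_bit m k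
  rw [hmap, sum_bits_mod]
  -- RHS
  rw [altFold_natCast, PySem.Int.band_of_nonneg (by positivity) (by norm_num)]
  simp only [Int.toNat_natCast, Int.toNat_one, Nat.and_one_is_mod]
  have hinit : ∀ j, m.testBit j = wxor m 1 j := by
    intro j
    simp [wxor]
  have hr := nfold_bit m bl hm2 1 m (by omega) hinit
  rw [testBit_div_mod, pow_zero, Nat.div_one] at hr
  cases hW : wxor m bl 0 <;> rw [hW] at hr <;> simp at hr ⊢ <;> omega

-- ===== VERDICT (by name: the statement is the Claim_ definition above) =====
theorem pos_valid_spec : Claim_equal_pos_valid := by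
  intro pos _ hpre
  unfold Spec_pos_valid pos_valid pos_valid_alt
  by_cases hg : pos.1 = -1 ∨ pos.2 = -1
  · simp [hg]
  · simp only [hg, if_false]
    have hv0 : 0 ≤ (3 + pos.1 + 2 * pos.2) * pos.1 + (pos.2 + 1) * pos.2 + pyGen := by
      unfold Pre_pos_valid at hpre
      push_neg at hg
      unfold pyGen
      rcases hpre with h | h | h
      · exact absurd h hg.1
      · exact absurd h hg.2
      · exact h
    exact main_eq _ hv0
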